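-- pv_equiv track=rewrite | github.com/stresszero/code_snippets | Math/moser_de_bruijin_seq.py | rec_moser_de_bruijn
-- ===== SOURCE A (Python) =====
-- def rec_moser_de_bruijn(n):
--     if n == 0:
--         return 0
--     elif n == 1:
--         return 1
--     elif n % 2 == 0:
--         return 4 * rec_moser_de_bruijn(n // 2)
--     else:
--         return 4 * rec_moser_de_bruijn(n // 2) + 1
-- ===== SOURCE B (Python) =====
-- def rec_moser_de_bruijn(n):
--     result = 0
--     power = 1
--     while n > 0:
--         if n & 1:
--             result += power
--         power *= 4
--         n >>= 1
--     return result
-- ===== Notes on version B (the rewrite author's own statement) =====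
-- stated objective: idiomatic
-- what changed: Replaces the recursive halving of n by a single iterative loop that reads the bits of n least-significant first and accumulates the result with a running power of four (reinterpreting binary digits in base four).
import Mathlib
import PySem

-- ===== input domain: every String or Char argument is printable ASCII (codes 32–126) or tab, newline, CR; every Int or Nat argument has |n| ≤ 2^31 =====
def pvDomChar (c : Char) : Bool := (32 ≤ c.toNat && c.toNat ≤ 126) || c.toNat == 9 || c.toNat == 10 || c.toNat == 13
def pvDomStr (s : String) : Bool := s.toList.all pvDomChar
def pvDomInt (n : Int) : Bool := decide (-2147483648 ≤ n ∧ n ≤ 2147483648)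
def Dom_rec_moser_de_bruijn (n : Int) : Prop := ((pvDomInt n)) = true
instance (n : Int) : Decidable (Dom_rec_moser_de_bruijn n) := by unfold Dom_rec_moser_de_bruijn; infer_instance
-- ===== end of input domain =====

-- B replaces A's recursion rec(n)=4*rec(n//2)+(n&1) by a single iterative least-significant-bit loop with a running power of 4 (idiomatic; return-value equivalence for n ≥ 0).


-- ===== PORT A =====
-- fuel makes the recursion total; n.toNat + 2 steps always suffice for n ≥ 0 (the admitted inputs)
def recGoA : Nat → Int → Int
  | 0, _ => 0
  | fuel + 1, n =>
    if n = 0 then 0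
    else if n = 1 then 1
    else if PySem.Int.mod n 2 = 0 then 4 * recGoA fuel (PySem.Int.floordiv n 2)
    else 4 * recGoA fuel (PySem.Int.floordiv n 2) + 1

def rec_moser_de_bruijn (n : Int) : Int := recGoA (n.toNat + 2) n

-- ===== PORT B =====
-- the while loop: while n > 0: if n & 1: result += power; power *= 4; n >>= 1
def altLoop (n result power : Int) : Int :=
  if h : 0 < n then
    altLoop (n >>> (1:Nat)) (if PySem.Int.band n 1 ≠ 0 then result + power else result) (power * 4)
  else result
termination_by n.toNat
decreasing_by
  have h2 : n >>> (1:Nat) = n / 2 := by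
    simpa using Int.shiftRight_eq_div_pow n (1:Nat)
  omega

def rec_moser_de_bruijn_alt (n : Int) : Int := altLoop n 0 1

-- ===== PRECONDITION & SPEC =====
-- Pre_ excludes negative n, on which A recurses forever (RecursionError)
def Pre_rec_moser_de_bruijn (n : Int) : Prop := 0 ≤ n
instance (n : Int) : Decidable (Pre_rec_moser_de_bruijn n) := by unfold Pre_rec_moser_de_bruijn; infer_instance
def pvWitness_rec_moser_de_bruijn : Int := 5

def Spec_rec_moser_de_bruijn (n : Int) (out : Int) : Prop := out = rec_moser_de_bruijn_alt n
instance (n : Int) (out : Int) : Decidable (Spec_rec_moser_de_bruijn n out) := by unfold Spec_rec_moser_de_bruijn; infer_instance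

-- ===== CLAIM (what is proved, stated in full; the proofs are below) =====
def Claim_equal_rec_moser_de_bruijn : Prop := ∀ (n : Int), Dom_rec_moser_de_bruijn n → Pre_rec_moser_de_bruijn n → Spec_rec_moser_de_bruijn n (rec_moser_de_bruijn n)

-- ===== LEMMAS AND PROOFS =====
-- reference value: the Moser-de Bruijn number of a natural index
def mref : Nat → Int
  | 0 => 0
  | m + 1 => 4 * mref ((m + 1) / 2) + (((m + 1) % 2 : Nat) : Int)

lemma recGoA_eq_mref : ∀ (fuel : Nat) (n : Int), 0 ≤ n → n.toNat + 1 ≤ fuel →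
    recGoA fuel n = mref n.toNat := by
  intro fuel
  induction fuel with
  | zero => intro n _ hf; omega
  | succ f ih =>
    intro n hn hf
    by_cases h0 : n = 0
    · simp [recGoA, h0, mref]
    by_cases h1 : n = 1
    · subst h1; simp [recGoA, mref]
    have h2 : (2 : Int) ≤ n := by omega
    have hd : PySem.Int.floordiv n 2 = n / 2 :=
      PySem.Int.floordiv_eq_ediv_of_pos (by omega)
    have hm : PySem.Int.mod n 2 = n % 2 :=
      PySem.Int.mod_eq_emod_of_pos (by omega)
    have hdn : (n / 2).toNat = n.toNat / 2 := by omega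
    have hrec : recGoA f (PySem.Int.floordiv n 2) = mref (n.toNat / 2) := by
      rw [hd, ← hdn]
      exact ih _ (by omega) (by omega)
    have hmref : mref n.toNat = 4 * mref (n.toNat / 2) + ((n.toNat % 2 : Nat) : Int) := by
      obtain ⟨m, hm'⟩ : ∃ m, n.toNat = m + 1 := ⟨n.toNat - 1, by omega⟩
      rw [hm', mref]
    by_cases he : PySem.Int.mod n 2 = 0
    · have : n % 2 = 0 := by rw [← hm]; exact he
      simp only [recGoA, h0, h1, he, if_false, if_true]
      rw [hrec, hmref]
      have : (n.toNat % 2 : Nat) = 0 := by omega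
      simp [this]
    · have : n % 2 = 1 := by rw [hm] at he; omega
      simp only [recGoA, h0, h1, he, if_false]
      rw [hrec, hmref]
      have : (n.toNat % 2 : Nat) = 1 := by omega
      simp [this]

lemma altLoop_eq (k : Nat) : ∀ (n r p : Int), 0 ≤ n → n.toNat ≤ k → altLoop n r p = r + p * mref n.toNat := by
  induction k with
  | zero =>
    intro n r p hn hk
    have hz : n = 0 := by omega
    rw [altLoop]
    simp [hz, mref]
  | succ k ih =>
    intro n r p hn hk
    by_cases h : 0 < n
    · have hsh : n >>> (1:Nat) = n / 2 := by simpa using Int.shiftRight_eq_div_pow n (1:Nat)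
      have hband : PySem.Int.band n 1 = n % 2 := by
        rw [PySem.Int.band_one]
        exact PySem.Int.mod_eq_emod_of_pos (by omega)
      rw [altLoop]
      simp only [h, dif_pos]
      rw [ih (n >>> (1:Nat)) _ _ (by omega) (by omega)]
      have hdn : (n >>> (1:Nat)).toNat = n.toNat / 2 := by omega
      have hmref : mref n.toNat = 4 * mref (n.toNat / 2) + ((n.toNat % 2 : Nat) : Int) := by
        obtain ⟨m, hm'⟩ : ∃ m, n.toNat = m + 1 := ⟨n.toNat - 1, by omega⟩
        rw [hm', mref]
      rw [hdn, hband]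
      by_cases he : n % 2 = 0
      · have : (n.toNat % 2 : Nat) = 0 := by omega
        simp [he, hmref, this]; ring
      · have h1 : n % 2 = 1 := by omega
        have : (n.toNat % 2 : Nat) = 1 := by omega
        simp [h1, hmref, this]; ring
    · have hz : n = 0 := by omega
      rw [altLoop]
      simp [hz, mref]

-- ===== VERDICT (by name: the statement is the Claim_ definition above) =====
theorem rec_moser_de_bruijn_spec : Claim_equal_rec_moser_de_bruijn := by
  intro n _ hpre
  unfold Spec_rec_moser_de_bruijn rec_moser_de_bruijn rec_moser_de_bruijn_alt
  rw [recGoA_eq_mref _ n hpre (by omega), altLoop_eq n.toNat n 0 1 hpre (by omega)]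
  ring
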